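-- pv_equiv track=rewrite | github.com/ModPunchtree/URCL-Optimiser-V2 | URCLOptimiserV2/urcl_optimiser_v2.py | duplicateLOD
-- ===== SOURCE A (Python) =====
-- def removeEmptyLines(code: list):
--
--     success = False
--
--     code2 = []
--     for line in code:
--         if line and (line != [""]) and (line != [" "]):
--             code2.append(line)
--         else:
--             success = True
--
--     return code2, success
--
-- def duplicateLOD(code: list):
--
--     write1MinusLOD = (
--         "ADD",
--         "RSH",
--         "NOR",
--         "SUB",
--         "MOV",
--         "IMM",
--         "LSH",
--         "INC",
--         "DEC",
--         "NEG",
--         "AND",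
--         "OR",
--         "NOT",
--         "XNOR",
--         "XOR",
--         "NAND",
--         "POP",
--         "HPOP",
--         "HRSR",
--         "MLT",
--         "DIV",
--         "MOD",
--         "BSR",
--         "BSL",
--         "SRS",
--         "BSS",
--         "SETE",
--         "SETNE",
--         "SETG",
--         "SETL",
--         "SETGE",
--         "SETLE",
--         "SETC",
--         "SETNC",
--         "LLOD",
--         "SDIV",
--         "SSETL",
--         "SSETG",
--         "SSETLE",
--         "SSETGE",
--         "ABS",
--         "IN"
--     )
--
--     for index1, line1 in enumerate(code):
--         if line1[0] == "LOD":
--             reg = line1[1]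
--             target = line1[2]
--             if target.startswith((".", "M")):
--                 for index2, line2 in enumerate(code[index1 + 1: ]):
--                     if line2[0] in write1MinusLOD:
--                         if line2[1] == reg:
--                             break
--                     elif line2[0] == "LOD":
--                         if (line2[1] == reg) and (line2[2] == target):
--                             code[index1 + 1 + index2] = [""]
--                         elif line2[1] == reg:
--                             break
--                     elif line2[0].startswith("."):
--                         break
--
--     code, success = removeEmptyLines(code)
--
--     return code, success
-- ===== SOURCE B (Python) =====
-- WRITE1MINUS = frozenset((
--     "ADD", "RSH", "NOR", "SUB", "MOV", "IMM", "LSH", "INC", "DEC", "NEG",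
--     "AND", "OR", "NOT", "XNOR", "XOR", "NAND", "POP", "HPOP", "HRSR", "MLT",
--     "DIV", "MOD", "BSR", "BSL", "SRS", "BSS", "SETE", "SETNE", "SETG", "SETL",
--     "SETGE", "SETLE", "SETC", "SETNC", "LLOD", "SDIV", "SSETL", "SSETG",
--     "SSETLE", "SSETGE", "ABS", "IN",
-- ))
--
-- def duplicateLOD(code: list):
--     # Single forward pass: avail maps a register to the memory target whose value
--     # it is known to hold (set by a LOD reg target with target starting '.'/'M'),
--     # invalidated when the register is written or a label is crossed.
--     avail = {}
--     out = []
--     success = False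
--     for line in code:
--         if (not line) or line == [""] or line == [" "]:
--             success = True
--             continue
--         op = line[0]
--         if op in WRITE1MINUS:
--             avail.pop(line[1], None)
--         elif op == "LOD":
--             reg = line[1]
--             target = line[2]
--             if avail.get(reg) == target:
--                 success = True
--                 continue
--             avail.pop(reg, None)
--             if target.startswith((".", "M")):
--                 avail[reg] = target
--         elif op.startswith("."):
--             avail.clear()
--         out.append(line)
--     return out, success
-- ===== Notes on version B (the rewrite author's own statement) =====
-- stated objective: alternative
-- what changed: A rescans the suffix of the program for every tracked LOD (nested loops, blanking duplicates in place and filtering them out afterwards); B makes one forward pass keeping a reg->available-target dict, dropping a LOD whose binding is already available and invalidating bindings on register writes and labels.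
-- outside the precondition, e.g. on duplicateLOD([['ADD']]): A returns ([['ADD']], False), B raises IndexError
import Mathlib
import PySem

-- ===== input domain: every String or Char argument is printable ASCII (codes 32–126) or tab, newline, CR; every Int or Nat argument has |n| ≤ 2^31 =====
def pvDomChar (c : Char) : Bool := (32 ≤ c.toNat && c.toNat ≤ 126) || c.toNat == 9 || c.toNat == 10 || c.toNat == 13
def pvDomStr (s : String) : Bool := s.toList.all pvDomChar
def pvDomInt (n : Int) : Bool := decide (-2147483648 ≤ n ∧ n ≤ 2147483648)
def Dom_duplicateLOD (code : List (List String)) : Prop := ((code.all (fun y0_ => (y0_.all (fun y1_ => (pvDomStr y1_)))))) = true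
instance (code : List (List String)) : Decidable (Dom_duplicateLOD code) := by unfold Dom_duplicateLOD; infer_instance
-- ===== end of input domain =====

-- B replaces A's nested tracker-rescans by one forward pass with a reg → available-target
-- dict; equivalence is about the RETURN value only (Python A blanks lines of its argument in
-- place, B does not mutate).

-- the write1MinusLOD instruction table (shared by both ports and by Pre_)
def pvWriteList : List String :=
  ["ADD", "RSH", "NOR", "SUB", "MOV", "IMM", "LSH", "INC", "DEC", "NEG",
   "AND", "OR", "NOT", "XNOR", "XOR", "NAND", "POP", "HPOP", "HRSR", "MLT",
   "DIV", "MOD", "BSR", "BSL", "SRS", "BSS", "SETE", "SETNE", "SETG", "SETL",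
   "SETGE", "SETLE", "SETC", "SETNC", "LLOD", "SDIV", "SSETL", "SSETG",
   "SSETLE", "SSETGE", "ABS", "IN"]

-- ===== PORT A =====

-- A's inner loop 'for index2, line2 in enumerate(code[index1+1:])': scans the suffix after a
-- tracked 'LOD reg target', blanking duplicates to [""]; 'break' keeps the rest unchanged.
def pvInnerA (reg target : String) : List (List String) → List (List String)
  | [] => []
  | l :: ls =>
    if pvWriteList.contains (PySem.List.pyGetD l 0 "") then
      if PySem.List.pyGetD l 1 "" == reg then l :: ls
      else l :: pvInnerA reg target ls
    else if PySem.List.pyGetD l 0 "" == "LOD" then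
      if PySem.List.pyGetD l 1 "" == reg && PySem.List.pyGetD l 2 "" == target then
        [""] :: pvInnerA reg target ls
      else if PySem.List.pyGetD l 1 "" == reg then l :: ls
      else l :: pvInnerA reg target ls
    else if PySem.Str.startswith (PySem.List.pyGetD l 0 "") "." then l :: ls
    else l :: pvInnerA reg target ls

theorem pvInnerA_length (reg target : String) (ls : List (List String)) :
    (pvInnerA reg target ls).length = ls.length := by
  induction ls with
  | nil => rfl
  | cons l ls ih =>
    simp only [pvInnerA]
    split_ifs <;> simp [ih]

-- A's outer loop 'for index1, line1 in enumerate(code)': line1 is read from the live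
-- (partially blanked) list, so we recurse on the current suffix.
def pvOuterA : List (List String) → List (List String)
  | [] => []
  | l :: ls =>
    if PySem.List.pyGetD l 0 "" == "LOD" then
      if PySem.Str.startswith (PySem.List.pyGetD l 2 "") "."
          || PySem.Str.startswith (PySem.List.pyGetD l 2 "") "M" then
        l :: pvOuterA (pvInnerA (PySem.List.pyGetD l 1 "") (PySem.List.pyGetD l 2 "") ls)
      else l :: pvOuterA ls
    else l :: pvOuterA ls
termination_by ls => ls.length
decreasing_by
  · simp [pvInnerA_length]
  · simp
  · simp

def pvRemoveEmptyLines : List (List String) → List (List String) × Bool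
  | [] => ([], false)
  | l :: ls =>
    let r := pvRemoveEmptyLines ls
    if !l.isEmpty && l != [""] && l != [" "] then (l :: r.1, r.2) else (r.1, true)

def duplicateLOD (code : List (List String)) : List (List String) × Bool :=
  pvRemoveEmptyLines (pvOuterA code)

-- ===== PORT B =====

-- Source B's frozenset of write ops
def pvWriteSetB : PySem.Set String := PySem.Set.ofList pvWriteList

-- Source B's single loop: avail maps a register to the memory target it is known to hold.
def pvGoB (st : PySem.Dict String String) : List (List String) → List (List String) × Bool
  | [] => ([], false)
  | l :: ls =>
    if l.isEmpty || l == [""] || l == [" "] then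
      let r := pvGoB st ls; (r.1, true)
    else if pvWriteSetB.contains (PySem.List.pyGetD l 0 "") then
      let r := pvGoB (st.erase (PySem.List.pyGetD l 1 "")) ls; (l :: r.1, r.2)
    else if PySem.List.pyGetD l 0 "" == "LOD" then
      if st.get? (PySem.List.pyGetD l 1 "") == some (PySem.List.pyGetD l 2 "") then
        let r := pvGoB st ls; (r.1, true)
      else
        let st1 := st.erase (PySem.List.pyGetD l 1 "")
        let st2 := if PySem.Str.startswith (PySem.List.pyGetD l 2 "") "."
            || PySem.Str.startswith (PySem.List.pyGetD l 2 "") "M" then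
          st1.insert (PySem.List.pyGetD l 1 "") (PySem.List.pyGetD l 2 "") else st1
        let r := pvGoB st2 ls; (l :: r.1, r.2)
    else if PySem.Str.startswith (PySem.List.pyGetD l 0 "") "." then
      let r := pvGoB PySem.Dict.empty ls; (l :: r.1, r.2)
    else
      let r := pvGoB st ls; (l :: r.1, r.2)

def duplicateLOD_alt (code : List (List String)) : List (List String) × Bool :=
  pvGoB PySem.Dict.empty code

-- ===== PRECONDITION & SPEC =====

-- a line never raises IndexError when its accessed operands exist
def pvLineOK (l : List String) : Prop :=
  (PySem.List.pyGetD l 0 "" = "LOD" → 3 ≤ l.length) ∧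
  (PySem.List.pyGetD l 0 "" ∈ pvWriteList → 2 ≤ l.length)

-- Pre_ excludes malformed lines (an empty line, a "LOD" with fewer than 3 tokens, a write op
-- with fewer than 2): on those both programs index past the end — A always raises on an empty
-- line or a short LOD, and a short write op raises in whichever program reaches its operand
-- (A only when an active tracker scans it, B always).
def Pre_duplicateLOD (code : List (List String)) : Prop :=
  ∀ l ∈ code, l ≠ [] ∧ pvLineOK l
instance (code : List (List String)) : Decidable (Pre_duplicateLOD code) := by
  unfold Pre_duplicateLOD pvLineOK; infer_instance

def pvWitness_duplicateLOD : List (List String) :=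
  [["LOD", "R1", ".x"], ["LOD", "R1", ".x"], ["NOP"]]

def Spec_duplicateLOD (code : List (List String)) (out : List (List String) × Bool) : Prop := out = duplicateLOD_alt code
instance (code : List (List String)) (out : List (List String) × Bool) : Decidable (Spec_duplicateLOD code out) := by unfold Spec_duplicateLOD; infer_instance

-- ===== CLAIM (what is proved, stated in full; the proofs are below) =====
def Claim_equal_duplicateLOD : Prop := ∀ (code : List (List String)), Dom_duplicateLOD code → Pre_duplicateLOD code → Spec_duplicateLOD code (duplicateLOD code)


-- ===== LEMMAS AND PROOFS =====

theorem pv_get?_erase (d : PySem.Dict String String) (k k' : String) :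
    (d.erase k).get? k' = if k' = k then none else d.get? k' := by
  obtain ⟨items⟩ := d
  simp only [PySem.Dict.erase, PySem.Dict.get?]
  induction items with
  | nil => simp
  | cons p ps ih =>
    obtain ⟨a, b⟩ := p
    by_cases hak : a = k <;> by_cases hak' : a = k' <;>
      simp_all [beq_iff_eq]

set_option maxRecDepth 40000 in
theorem pvWriteSetB_eq : pvWriteSetB = pvWriteList := by decide

set_option maxRecDepth 40000 in
theorem pvLOD_not_in : "LOD" ∉ pvWriteSetB := by rw [pvWriteSetB_eq]; decide

theorem pvInnerA_idem (r t : String) (ls : List (List String)) :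
    pvInnerA r t (pvInnerA r t ls) = pvInnerA r t ls := by
  induction ls with
  | nil => rfl
  | cons a as ih =>
    simp only [pvInnerA]
    split_ifs <;> simp_all [pvInnerA]

theorem pvInnerA_preserve (r' t' r t : String) (hne : r' ≠ r) (ls : List (List String))
    (hfix : pvInnerA r' t' ls = ls) :
    pvInnerA r' t' (pvInnerA r t ls) = pvInnerA r t ls := by
  induction ls with
  | nil => rfl
  | cons a as ih =>
    simp only [pvInnerA] at hfix ⊢
    split_ifs at hfix ⊢ <;> simp_all [pvInnerA]

theorem pvInnerA_subset (r t : String) (ls : List (List String)) :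
    ∀ l ∈ pvInnerA r t ls, l ∈ ls ∨ l = [""] := by
  induction ls with
  | nil => simp [pvInnerA]
  | cons a as ih =>
    simp only [pvInnerA]
    split_ifs <;> intro l hl <;> rcases List.mem_cons.mp hl with h | h <;>
      simp_all <;> rcases ih l h with h' | h' <;> simp_all

theorem pvInnerA_pre (r t : String) (ls : List (List String))
    (h : ∀ l ∈ ls, l ≠ [] ∧ pvLineOK l) :
    ∀ l ∈ pvInnerA r t ls, l ≠ [] ∧ pvLineOK l := by
  intro l hl
  rcases pvInnerA_subset r t ls l hl with h' | h'
  · exact h l h'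
  · subst h'
    exact ⟨by simp, by constructor <;> intro hc <;> revert hc <;> decide⟩

-- the dict invariant tying B's state to A's already-performed blanking:
-- every available binding (r, t) means the (r, t) blanking pass is a no-op on the suffix
def pvInv (st : PySem.Dict String String) (ls : List (List String)) : Prop :=
  ∀ r t, st.get? r = some t → pvInnerA r t ls = ls

theorem pv_not_emptyish (a : List String) (h0 : PySem.List.pyGetD a 0 "" ≠ "")
    (h0' : PySem.List.pyGetD a 0 "" ≠ " ") :
    (a.isEmpty || a == [""] || a == [" "]) = false := by
  rcases a with _ | ⟨x, xs⟩
  · exact absurd rfl h0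
  · simp only [PySem.List.pyGetD_zero_cons] at h0 h0'
    simp [beq_iff_eq]
    constructor <;> intro h <;> simp_all

theorem pvGoB_inner (r t : String) (ls : List (List String)) :
    ∀ st : PySem.Dict String String, st.get? r = some t →
      pvGoB st (pvInnerA r t ls) = pvGoB st ls := by
  induction ls with
  | nil => intro st _; rfl
  | cons a as ih =>
    intro st hst
    simp only [pvInnerA]
    split_ifs with h1 h2 h3 h4 h5 h6
    · rfl
    · -- write op, other register: state erases a key ≠ r
      have hne : PySem.List.pyGetD a 1 "" ≠ r := by simpa using h2
      have hBm : PySem.List.pyGetD a 0 "" ∈ pvWriteSetB := by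
        have : PySem.List.pyGetD a 0 "" ∈ pvWriteList := by simpa using h1
        rw [pvWriteSetB_eq]; exact this
      have hno := pv_not_emptyish a
        (by intro e; rw [e] at h1; exact absurd h1 (by decide))
        (by intro e; rw [e] at h1; exact absurd h1 (by decide))
      have hx := ih (st.erase (PySem.List.pyGetD a 1 ""))
        (by rw [pv_get?_erase, if_neg (fun e => hne e.symm)]; exact hst)
      simp [pvGoB, hno, hBm, hx]
    · -- duplicate LOD blanked by A, dropped by B
      have hr : PySem.List.pyGetD a 1 "" = r := by
        have := (Bool.and_eq_true _ _).mp h4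
        simpa using this.1
      have ht : PySem.List.pyGetD a 2 "" = t := by
        have := (Bool.and_eq_true _ _).mp h4
        simpa using this.2
      have hL : PySem.List.pyGetD a 0 "" = "LOD" := by simpa using h3
      have hno := pv_not_emptyish a (by rw [hL]; decide) (by rw [hL]; decide)
      have hx := ih st hst
      simp [pvGoB, hno, hL, pvLOD_not_in, hr, ht, hst, hx]
    · rfl
    · -- other-register LOD: B's state change keeps (r, t)
      have hne : PySem.List.pyGetD a 1 "" ≠ r := by simpa using h5
      have hL : PySem.List.pyGetD a 0 "" = "LOD" := by simpa using h3
      have hno := pv_not_emptyish a (by rw [hL]; decide) (by rw [hL]; decide)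
      by_cases hdup : st.get? (PySem.List.pyGetD a 1 "") = some (PySem.List.pyGetD a 2 "")
      · have hx := ih st hst
        simp [pvGoB, hno, hL, pvLOD_not_in, hdup, hx]
      · by_cases hM : (PySem.Str.startswith (PySem.List.pyGetD a 2 "") "."
            || PySem.Str.startswith (PySem.List.pyGetD a 2 "") "M") = true
        · have hx := ih ((st.erase (PySem.List.pyGetD a 1 "")).insert
              (PySem.List.pyGetD a 1 "") (PySem.List.pyGetD a 2 ""))
            (by
              rw [PySem.Dict.get?_insert_of_ne _ _ (Ne.symm hne),
                pv_get?_erase, if_neg (fun e => hne e.symm)]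
              exact hst)
          have hMP := hM
          simp at hMP
          simp [pvGoB, hno, hL, pvLOD_not_in, hdup, hMP, hx]
        · have hx := ih (st.erase (PySem.List.pyGetD a 1 ""))
            (by rw [pv_get?_erase, if_neg (fun e => hne e.symm)]; exact hst)
          have hMN := hM
          simp [not_or] at hMN
          simp [pvGoB, hno, hL, pvLOD_not_in, hdup, hMN.1, hMN.2, hx]
    · rfl
    · -- inert line: same state on both sides
      have hx := ih st hst
      by_cases hno : (a.isEmpty || a == [""] || a == [" "]) = true
      · simp [pvGoB, hno, hx]
      · have hnoF : (a.isEmpty || a == [""] || a == [" "]) = false := by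
          simpa using hno
        have hBn : PySem.List.pyGetD a 0 "" ∉ pvWriteSetB := by
          rw [pvWriteSetB_eq]; simpa using h1
        have hLn : ¬ PySem.List.pyGetD a 0 "" = "LOD" := by simpa using h3
        have h6n := h6
        simp at h6n
        simp [pvGoB, hnoF, hBn, hLn, h6n, hx]

theorem pv_inv_empty (ls : List (List String)) : pvInv PySem.Dict.empty ls := by
  intro r t h
  simp [PySem.Dict.get?_empty] at h

theorem pv_bne_of_ne {x r : String} (h : r ≠ x) : ¬ ((x == r) = true) :=
  fun e => h (beq_iff_eq.mp e).symm

theorem pv_bne_and {x y r t : String} (h : r ≠ x) : ¬ ((x == r && y == t) = true) :=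
  fun e => h (beq_iff_eq.mp ((Bool.and_eq_true _ _).mp e).1).symm

theorem pv_main : ∀ (n : Nat) (ls : List (List String)) (st : PySem.Dict String String),
    ls.length ≤ n → (∀ l ∈ ls, l ≠ [] ∧ pvLineOK l) → pvInv st ls →
    pvRemoveEmptyLines (pvOuterA ls) = pvGoB st ls := by
  intro n
  induction n with
  | zero =>
    intro ls st hlen _ _
    have : ls = [] := List.eq_nil_of_length_eq_zero (Nat.le_zero.mp hlen)
    subst this; simp [pvOuterA, pvRemoveEmptyLines, pvGoB]
  | succ n ih =>
    intro ls st hlen hpre hinv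
    match ls with
    | [] => simp [pvOuterA, pvRemoveEmptyLines, pvGoB]
    | a :: as =>
      obtain ⟨hane, hok⟩ := hpre a (by simp)
      have hpre' : ∀ l ∈ as, l ≠ [] ∧ pvLineOK l := fun l hl => hpre l (by simp [hl])
      have hlen' : as.length ≤ n := by simpa using hlen
      by_cases hE : a = [""] ∨ a = [" "]
      · -- line dropped by removeEmptyLines; inert for every tracker
        have hstep : pvOuterA (a :: as) = a :: pvOuterA as := by
          rcases hE with h | h <;> subst h <;>
            (simp only [pvOuterA]; rw [if_neg (by decide)])
        have hinv' : pvInv st as := by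
          intro r t hrt
          have h0 := hinv r t hrt
          rcases hE with h | h <;> subst h <;>
            simp [pvInnerA, pvWriteList, PySem.Chars.startswith] at h0 <;> try exact h0
        have hgoB : pvGoB st (a :: as) = ((pvGoB st as).1, true) := by
          rcases hE with h | h <;> subst h <;> simp [pvGoB]
        have hrme : pvRemoveEmptyLines (a :: pvOuterA as) =
            ((pvRemoveEmptyLines (pvOuterA as)).1, true) := by
          rcases hE with h | h <;> subst h <;> simp [pvRemoveEmptyLines]
        rw [hstep, hgoB, hrme, ih as st hlen' hpre' hinv']
      · push Not at hE
        have hnoF : (a.isEmpty || a == [""] || a == [" "]) = false := by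
          simp [hane, hE.1, hE.2]
        have hkeep : (!a.isEmpty && a != [""] && a != [" "]) = true := by
          simp [hane, hE.1, hE.2]
        by_cases hW : pvWriteList.contains (PySem.List.pyGetD a 0 "") = true
        · -- a write instruction: clobbers its first operand
          have hL0 : ¬ (PySem.List.pyGetD a 0 "" == "LOD") = true := by
            intro h
            simp only [beq_iff_eq] at h
            rw [h] at hW
            exact absurd hW (by decide)
          have hBm : PySem.List.pyGetD a 0 "" ∈ pvWriteSetB := by
            have : PySem.List.pyGetD a 0 "" ∈ pvWriteList := by simpa using hW
            rw [pvWriteSetB_eq]; exact this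
          have houter : pvOuterA (a :: as) = a :: pvOuterA as := by
            simp only [pvOuterA]; rw [if_neg hL0]
          have hinv' : pvInv (st.erase (PySem.List.pyGetD a 1 "")) as := by
            intro r t hrt
            rw [pv_get?_erase] at hrt
            by_cases hrk : r = PySem.List.pyGetD a 1 ""
            · rw [if_pos hrk] at hrt; exact absurd hrt (by simp)
            · rw [if_neg hrk] at hrt
              have h0 := hinv r t hrt
              simp only [pvInnerA, if_pos hW] at h0
              rw [if_neg (pv_bne_of_ne hrk)] at h0
              exact (by simpa using h0)
          have hx := ih as _ hlen' hpre' hinv'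
          rw [houter]
          simp [pvRemoveEmptyLines, pvGoB, hkeep, hnoF, hBm, hx]
        · have hBn : PySem.List.pyGetD a 0 "" ∉ pvWriteSetB := by
            rw [pvWriteSetB_eq]; simpa using hW
          by_cases hL : (PySem.List.pyGetD a 0 "" == "LOD") = true
          · have hLe : PySem.List.pyGetD a 0 "" = "LOD" := by simpa using hL
            by_cases hdup : st.get? (PySem.List.pyGetD a 1 "") = some (PySem.List.pyGetD a 2 "")
            · -- impossible: A would already have blanked this duplicate line
              exfalso
              have h0 := hinv _ _ hdup
              simp [pvInnerA, pvWriteList, hLe] at h0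
              exact hE.1 h0.1.symm
            · by_cases hM : (PySem.Str.startswith (PySem.List.pyGetD a 2 "") "."
                  || PySem.Str.startswith (PySem.List.pyGetD a 2 "") "M") = true
              · -- a new tracker: A blanks ahead, B records the binding
                have houter : pvOuterA (a :: as) = a :: pvOuterA
                    (pvInnerA (PySem.List.pyGetD a 1 "") (PySem.List.pyGetD a 2 "") as) := by
                  simp only [pvOuterA]; rw [if_pos hL, if_pos hM]
                have hst2 : ((st.erase (PySem.List.pyGetD a 1 "")).insert
                    (PySem.List.pyGetD a 1 "") (PySem.List.pyGetD a 2 "")).get?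
                    (PySem.List.pyGetD a 1 "") = some (PySem.List.pyGetD a 2 "") :=
                  PySem.Dict.get?_insert_self _ _ _
                have hinv2 : pvInv ((st.erase (PySem.List.pyGetD a 1 "")).insert
                    (PySem.List.pyGetD a 1 "") (PySem.List.pyGetD a 2 ""))
                    (pvInnerA (PySem.List.pyGetD a 1 "") (PySem.List.pyGetD a 2 "") as) := by
                  intro r t hrt
                  by_cases hrr : r = PySem.List.pyGetD a 1 ""
                  · subst hrr
                    rw [hst2] at hrt
                    cases hrt
                    exact pvInnerA_idem _ _ as
                  · rw [PySem.Dict.get?_insert_of_ne _ _ hrr, pv_get?_erase, if_neg hrr] at hrt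
                    have h0 := hinv r t hrt
                    simp only [pvInnerA, if_neg hW, if_pos hL] at h0
                    rw [if_neg (pv_bne_and hrr), if_neg (pv_bne_of_ne hrr)] at h0
                    exact pvInnerA_preserve r t _ _ hrr as (by simpa using h0)
                have hlen2 : (pvInnerA (PySem.List.pyGetD a 1 "") (PySem.List.pyGetD a 2 "") as).length ≤ n := by
                  rw [pvInnerA_length]; exact hlen'
                have hx := ih _ _ hlen2 (pvInnerA_pre _ _ as hpre') hinv2
                have hy := pvGoB_inner _ _ as _ hst2
                rw [houter]
                have hMP := hM
                simp at hMP
                simp [pvRemoveEmptyLines, pvGoB, hkeep, hnoF, hLe, pvLOD_not_in, hdup, hMP, hx, hy]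
              · -- LOD from a non-tracked target: only clobbers its register
                have houter : pvOuterA (a :: as) = a :: pvOuterA as := by
                  simp only [pvOuterA]; rw [if_pos hL, if_neg hM]
                have hinv' : pvInv (st.erase (PySem.List.pyGetD a 1 "")) as := by
                  intro r t hrt
                  rw [pv_get?_erase] at hrt
                  by_cases hrk : r = PySem.List.pyGetD a 1 ""
                  · rw [if_pos hrk] at hrt; exact absurd hrt (by simp)
                  · rw [if_neg hrk] at hrt
                    have h0 := hinv r t hrt
                    simp only [pvInnerA, if_neg hW, if_pos hL] at h0
                    rw [if_neg (pv_bne_and hrk), if_neg (pv_bne_of_ne hrk)] at h0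
                    exact (by simpa using h0)
                have hx := ih as _ hlen' hpre' hinv'
                rw [houter]
                have hMN := hM
                simp [not_or] at hMN
                simp [pvRemoveEmptyLines, pvGoB, hkeep, hnoF, hLe, pvLOD_not_in, hdup, hMN.1, hMN.2, hx]
          · by_cases hDot : (PySem.Str.startswith (PySem.List.pyGetD a 0 "") ".") = true
            · -- a label: A's scans all break here, B clears the dict
              have houter : pvOuterA (a :: as) = a :: pvOuterA as := by
                simp only [pvOuterA]; rw [if_neg hL]
              have hx := ih as PySem.Dict.empty hlen' hpre' (pv_inv_empty as)
              rw [houter]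
              have hDotP := hDot
              simp at hDotP
              simp [pvRemoveEmptyLines, pvGoB, hkeep, hnoF, hBn, hL, hDotP, hx]
            · -- an inert line
              have hinv' : pvInv st as := by
                intro r t hrt
                have h0 := hinv r t hrt
                simp only [pvInnerA, if_neg hW, if_neg hL, if_neg hDot] at h0
                exact (by simpa using h0)
              have houter : pvOuterA (a :: as) = a :: pvOuterA as := by
                simp only [pvOuterA]; rw [if_neg hL]
              have hx := ih as st hlen' hpre' hinv'
              rw [houter]
              have hDotN := hDot
              simp at hDotN
              have hLn : ¬ PySem.List.pyGetD a 0 "" = "LOD" := by simpa using hL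
              simp [pvRemoveEmptyLines, pvGoB, hkeep, hnoF, hBn, hLn, hDotN, hx]


-- ===== VERDICT (by name: the statement is the Claim_ definition above) =====
theorem duplicateLOD_spec : Claim_equal_duplicateLOD := by
  intro code _ hpre
  unfold Spec_duplicateLOD duplicateLOD duplicateLOD_alt
  exact pv_main code.length code PySem.Dict.empty le_rfl hpre (pv_inv_empty code)
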